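-- pv_equiv track=rewrite | github.com/the-omics-os/lobster-local | lobster/tools/providers/pride_normalizer.py | extract_ftp_url
-- ===== SOURCE A (Python) =====
-- from typing import Any, Dict, List, Optional, Union
--
-- def extract_ftp_url(locations: List[Dict[str, str]]) -> Optional[str]:
--     """
--     Extract FTP URL from normalized publicFileLocations.
--
--     Searches for FTP Protocol in priority order. Returns None if not found.
--
--     Args:
--         locations: Normalized publicFileLocations list
--
--     Returns:
--         Optional[str]: FTP URL or None
--
--     Example:
--         >>> locs = [{"name": "FTP Protocol", "value": "ftp://example.com"}]
--         >>> PRIDENormalizer.extract_ftp_url(locs)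
--         "ftp://example.com"
--     """
--     if not isinstance(locations, list):
--         return None
--
--     # Protocol priority: FTP > HTTP > S3
--     priority = ["FTP Protocol", "HTTP Protocol", "HTTPS Protocol", "S3 Protocol"]
--
--     for protocol in priority:
--         for loc in locations:
--             if isinstance(loc, dict) and loc.get("name") == protocol:
--                 url = loc.get("value")
--                 if url:
--                     return url
--
--     # Fallback: return first available URL
--     for loc in locations:
--         if isinstance(loc, dict):
--             url = loc.get("value")
--             if url:
--                 return url
--
--     return None
-- ===== SOURCE B (Python) =====
-- def extract_ftp_url(locations):
--     """Single selection pass: rank each usable location by protocol priority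
--     and keep the candidate minimizing (rank, position)."""
--     if not isinstance(locations, list):
--         return None
--
--     priority = ["FTP Protocol", "HTTP Protocol", "HTTPS Protocol", "S3 Protocol"]
--
--     best = None  # (rank, url)
--     for loc in locations:
--         if not isinstance(loc, dict):
--             continue
--         url = loc.get("value")
--         if not url:
--             continue
--         name = loc.get("name")
--         rank = priority.index(name) if name in priority else 4
--         if best is None or rank < best[0]:
--             best = (rank, url)
--     return best[1] if best is not None else None
-- ===== Notes on version B (the rewrite author's own statement) =====
-- stated objective: alternative
-- what changed: Replaced A's four per-protocol rescans plus a separate fallback scan with a single pass that ranks each usable location by protocol priority and keeps the (rank, position)-minimal candidate.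
import Mathlib
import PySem

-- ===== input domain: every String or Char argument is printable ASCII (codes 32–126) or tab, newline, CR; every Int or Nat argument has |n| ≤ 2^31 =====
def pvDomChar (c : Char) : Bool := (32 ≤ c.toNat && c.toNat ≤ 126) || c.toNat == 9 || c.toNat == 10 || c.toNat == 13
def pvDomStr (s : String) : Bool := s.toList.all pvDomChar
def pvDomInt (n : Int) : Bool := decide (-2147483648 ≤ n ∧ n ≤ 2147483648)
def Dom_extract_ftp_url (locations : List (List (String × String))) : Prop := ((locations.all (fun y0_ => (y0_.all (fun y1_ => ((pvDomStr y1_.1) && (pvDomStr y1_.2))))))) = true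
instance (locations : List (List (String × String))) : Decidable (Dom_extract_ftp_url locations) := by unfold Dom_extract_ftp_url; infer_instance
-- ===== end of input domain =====

-- ===== PORT A =====
-- B changes the decomposition only (one ranked selection pass instead of A's repeated
-- per-protocol scans plus a fallback scan); return values are proved identical.

-- dict.get(k): first match in the association list (exact for Python dict lookup)
def pvDGet (d : List (String × String)) (k : String) : Option String :=
  match d with
  | [] => none
  | (k', v) :: rest => if k' = k then some v else pvDGet rest k

-- inner 'for loc in locations' of A's priority loop
def pvInnerScan (protocol : String) (locs : List (List (String × String))) : Option String :=
  match locs with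
  | [] => none
  | loc :: rest =>
    if pvDGet loc "name" = some protocol then
      match pvDGet loc "value" with
      | some url => if url = "" then pvInnerScan protocol rest else some url
      | none => pvInnerScan protocol rest
    else pvInnerScan protocol rest

-- outer 'for protocol in priority' loop
def pvPriorityScan (ps : List String) (locs : List (List (String × String))) : Option String :=
  match ps with
  | [] => none
  | p :: ps' =>
    match pvInnerScan p locs with
    | some url => some url
    | none => pvPriorityScan ps' locs

-- final fallback loop
def pvFallback (locs : List (List (String × String))) : Option String :=
  match locs with
  | [] => none
  | loc :: rest =>
    match pvDGet loc "value" with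
    | some url => if url = "" then pvFallback rest else some url
    | none => pvFallback rest

def pvPriority : List String :=
  ["FTP Protocol", "HTTP Protocol", "HTTPS Protocol", "S3 Protocol"]

def extract_ftp_url (locations : List (List (String × String))) : Option String :=
  match pvPriorityScan pvPriority locations with
  | some url => some url
  | none => pvFallback locations

-- ===== PORT B =====
-- rank = priority.index(name) if name in priority else 4
def pvRankOf (name : Option String) : Nat :=
  if (pvPriority.map some).contains name then
    match PySem.List.index? (pvPriority.map some) name with
    | some i => i
    | none => 4
  else 4

-- the single selection loop of B, carrying the current best (rank, url)
def pvBLoop (locs : List (List (String × String))) (best : Option (Nat × String)) :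
    Option (Nat × String) :=
  match locs with
  | [] => best
  | loc :: rest =>
    match pvDGet loc "value" with
    | none => pvBLoop rest best
    | some url =>
      if url = "" then pvBLoop rest best
      else
        let rank := pvRankOf (pvDGet loc "name")
        match best with
        | none => pvBLoop rest (some (rank, url))
        | some (r, _) =>
          if rank < r then pvBLoop rest (some (rank, url)) else pvBLoop rest best

def extract_ftp_url_alt (locations : List (List (String × String))) : Option String :=
  match pvBLoop locations none with
  | some (_, url) => some url
  | none => none

-- ===== PRECONDITION & SPEC =====
def Spec_extract_ftp_url (locations : List (List (String × String))) (out : Option String) : Prop := out = extract_ftp_url_alt locations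
instance (locations : List (List (String × String))) (out : Option String) : Decidable (Spec_extract_ftp_url locations out) := by unfold Spec_extract_ftp_url; infer_instance

-- ===== CLAIM (what is proved, stated in full; the proofs are below) =====
def Claim_equal_extract_ftp_url : Prop := ∀ (locations : List (List (String × String))), Dom_extract_ftp_url locations → Spec_extract_ftp_url locations (extract_ftp_url locations)

-- ===== LEMMAS AND PROOFS =====

-- proof-side helpers -------------------------------------------------------
-- qualifying value of a location (nonempty "value"), and its rank
def pvQ (loc : List (String × String)) : Option String :=
  match pvDGet loc "value" with
  | some url => if url = "" then none else some url
  | none => none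

def pvRk (loc : List (String × String)) : Nat := pvRankOf (pvDGet loc "name")

-- the candidate the head location contributes
def pvStep (loc : List (String × String)) : Option (Nat × String) :=
  match pvQ loc with
  | some url => some (pvRk loc, url)
  | none => none

-- merge two candidates: left wins ties, lower rank wins
def pvComb (a b : Option (Nat × String)) : Option (Nat × String) :=
  match a with
  | none => b
  | some (r, u) =>
    match b with
    | none => some (r, u)
    | some (r', u') => if r' < r then some (r', u') else some (r, u)

-- first qualifying location of rank exactly r
def pvFo (r : Nat) (locs : List (List (String × String))) : Option String :=
  match locs with
  | [] => none
  | loc :: rest =>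
    match pvQ loc with
    | some url => if pvRk loc = r then some url else pvFo r rest
    | none => pvFo r rest

theorem pvRankOf_le (n : Option String) : pvRankOf n ≤ 4 := by
  unfold pvRankOf pvPriority
  rcases n with _ | s
  · simp
  · by_cases h1 : s = "FTP Protocol" <;> by_cases h2 : s = "HTTP Protocol" <;>
      by_cases h3 : s = "HTTPS Protocol" <;> by_cases h4 : s = "S3 Protocol" <;>
      simp_all [PySem.List.index?_eq_idxOf?, List.idxOf?, List.findIdx?_cons]

theorem pvRankOf_eq_iff (n : Option String) (r : Nat) (hr : r < 4) :
    pvRankOf n = r ↔ n = some (pvPriority.get ⟨r, by simp [pvPriority]; omega⟩) := by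
  unfold pvRankOf pvPriority
  rcases n with _ | s
  · interval_cases r <;> simp
  · by_cases h1 : s = "FTP Protocol" <;> by_cases h2 : s = "HTTP Protocol" <;>
      by_cases h3 : s = "HTTPS Protocol" <;> by_cases h4 : s = "S3 Protocol" <;>
      interval_cases r <;>
      simp_all [PySem.List.index?_eq_idxOf?, List.idxOf?, List.findIdx?_cons]

theorem pvComb_none_right (a : Option (Nat × String)) : pvComb a none = a := by
  rcases a with _ | ⟨r, u⟩ <;> simp [pvComb]

theorem pvComb_none_left (a : Option (Nat × String)) : pvComb none a = a := rfl

theorem pvComb_some_some (r r' : Nat) (u u' : String) :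
    pvComb (some (r, u)) (some (r', u')) = if r' < r then some (r', u') else some (r, u) := rfl

theorem pvComb_assoc (a b c : Option (Nat × String)) :
    pvComb (pvComb a b) c = pvComb a (pvComb b c) := by
  rcases a with _ | ⟨r1, u1⟩ <;> rcases b with _ | ⟨r2, u2⟩ <;> rcases c with _ | ⟨r3, u3⟩ <;>
    simp only [pvComb_none_left, pvComb_none_right, pvComb_some_some] <;>
    split_ifs <;>
    simp only [pvComb_none_left, pvComb_none_right, pvComb_some_some] <;>
    split_ifs <;> first | rfl | omega

theorem pvBLoop_comb (locs : List (List (String × String))) (b : Option (Nat × String)) :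
    pvBLoop locs b = pvComb b (pvBLoop locs none) := by
  induction locs generalizing b with
  | nil => simp [pvBLoop, pvComb_none_right]
  | cons loc rest ih =>
    cases hv : pvDGet loc "value" with
    | none => simp only [pvBLoop, hv]; exact ih b
    | some url =>
      by_cases hu : url = ""
      · simp only [pvBLoop, hv, hu]; exact ih b
      · simp only [pvBLoop, hv, if_neg hu]
        rcases b with _ | ⟨r, u⟩
        · simp [pvComb]
        · rw [ih (some (pvRankOf (pvDGet loc "name"), url)), ih (some (r, u)),
              ← pvComb_assoc]
          simp only [pvComb]
          split_ifs <;> rfl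

theorem pvBLoop_cons (loc : List (String × String)) (rest : List (List (String × String))) :
    pvBLoop (loc :: rest) none = pvComb (pvStep loc) (pvBLoop rest none) := by
  simp only [pvBLoop, pvStep, pvQ, pvRk]
  cases hv : pvDGet loc "value" with
  | none => simp [pvComb]
  | some url =>
    by_cases hu : url = ""
    · simp [hu, pvComb]
    · simp only [if_neg hu]
      exact pvBLoop_comb rest (some (pvRankOf (pvDGet loc "name"), url))

theorem pvFo_cons (r : Nat) (loc : List (String × String))
    (rest : List (List (String × String))) :
    pvFo r (loc :: rest) =
      match pvQ loc with
      | some url => if pvRk loc = r then some url else pvFo r rest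
      | none => pvFo r rest := rfl

theorem pvBLoop_char (locs : List (List (String × String))) :
    match pvBLoop locs none with
    | none => ∀ r, pvFo r locs = none
    | some (r, u) => r ≤ 4 ∧ pvFo r locs = some u ∧ ∀ r', r' < r → pvFo r' locs = none := by
  induction locs with
  | nil => intro r; rfl
  | cons loc rest ih =>
    rw [pvBLoop_cons]
    cases hs : pvStep loc with
    | none =>
      have hq : pvQ loc = none := by
        unfold pvStep at hs; cases h : pvQ loc <;> simp [h] at hs ⊢
      rw [pvComb_none_left]
      cases hb : pvBLoop rest none with
      | none => rw [hb] at ih; intro r; simp only [pvFo_cons, hq]; exact ih r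
      | some p =>
        rcases p with ⟨r, u⟩
        rw [hb] at ih
        obtain ⟨h1, h2, h3⟩ := ih
        refine ⟨h1, ?_, fun r' hr' => ?_⟩
        · simp only [pvFo_cons, hq]; exact h2
        · simp only [pvFo_cons, hq]; exact h3 r' hr'
    | some p =>
      rcases p with ⟨k, u0⟩
      have hq : pvQ loc = some u0 ∧ pvRk loc = k := by
        unfold pvStep at hs
        cases h : pvQ loc <;> rw [h] at hs
        · exact absurd hs (by simp)
        · simp only [Option.some.injEq, Prod.mk.injEq] at hs
          exact ⟨by simp [h, hs.2], hs.1⟩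
      obtain ⟨hq1, hq2⟩ := hq
      have hk4 : k ≤ 4 := by rw [← hq2]; exact pvRankOf_le _
      cases hb : pvBLoop rest none with
      | none =>
        rw [hb] at ih
        rw [pvComb_none_right]
        refine ⟨hk4, ?_, fun r' hr' => ?_⟩
        · simp only [pvFo_cons, hq1]; rw [if_pos hq2]
        · simp only [pvFo_cons, hq1]; rw [if_neg (by omega)]; exact ih r'
      | some p =>
        rcases p with ⟨r, u⟩
        rw [hb] at ih
        obtain ⟨h1, h2, h3⟩ := ih
        rw [pvComb_some_some]
        split_ifs with h
        · refine ⟨h1, ?_, fun r' hr' => ?_⟩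
          · simp only [pvFo_cons, hq1]; rw [if_neg (by omega)]; exact h2
          · simp only [pvFo_cons, hq1]; rw [if_neg (by omega)]; exact h3 r' hr'
        · refine ⟨hk4, ?_, fun r' hr' => ?_⟩
          · simp only [pvFo_cons, hq1]; rw [if_pos hq2]
          · simp only [pvFo_cons, hq1]; rw [if_neg (by omega)]; exact h3 r' (by omega)

theorem pvInnerScan_eq_fo (r : Nat) (hr : r < 4) (locs : List (List (String × String))) :
    pvInnerScan (pvPriority.get ⟨r, by simp [pvPriority]; omega⟩) locs = pvFo r locs := by
  induction locs with
  | nil => rfl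
  | cons loc rest ih =>
    simp only [pvInnerScan]
    rw [pvFo_cons]
    by_cases hn : pvDGet loc "name" = some (pvPriority.get ⟨r, by simp [pvPriority]; omega⟩)
    · have hrk : pvRk loc = r := by rw [pvRk, pvRankOf_eq_iff _ r hr]; exact hn
      rw [if_pos hn]
      cases hv : pvDGet loc "value" with
      | none => simp only [pvQ, hv]; exact ih
      | some url =>
        by_cases hu : url = ""
        · simp only [pvQ, hv, hu]; exact ih
        · simp only [pvQ, hv, if_neg hu, if_pos hrk]
    · have hrk : ¬ pvRk loc = r := by rw [pvRk, pvRankOf_eq_iff _ r hr]; exact hn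
      rw [if_neg hn]
      cases hv : pvQ loc with
      | none => simp only [hv]; exact ih
      | some url => simp only [hv]; rw [if_neg hrk]; exact ih

theorem pvFallback_eq_fo4 (locs : List (List (String × String)))
    (h : ∀ r', r' < 4 → pvFo r' locs = none) : pvFallback locs = pvFo 4 locs := by
  induction locs with
  | nil => rfl
  | cons loc rest ih =>
    have htail : ∀ r', r' < 4 → pvFo r' rest = none := by
      intro r' hr'
      have hh := h r' hr'
      simp only [pvFo_cons] at hh
      cases hq : pvQ loc with
      | none => simp only [hq] at hh; exact hh
      | some url =>
        simp only [hq] at hh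
        by_cases hrk : pvRk loc = r'
        · rw [if_pos hrk] at hh; exact absurd hh (by simp)
        · rw [if_neg hrk] at hh; exact hh
    simp only [pvFallback]
    rw [pvFo_cons]
    cases hv : pvDGet loc "value" with
    | none => simp only [pvQ, hv]; exact ih htail
    | some url =>
      by_cases hu : url = ""
      · simp only [pvQ, hv, hu]; exact ih htail
      · have hrk : pvRk loc = 4 := by
          have hle : pvRk loc ≤ 4 := pvRankOf_le (pvDGet loc "name")
          rcases Nat.lt_or_ge (pvRk loc) 4 with hlt | hge
          · exfalso
            have hh := h (pvRk loc) hlt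
            simp only [pvFo_cons] at hh
            simp [pvQ, hv, hu] at hh
          · omega
        simp only [pvQ, hv, if_neg hu, if_pos hrk]

theorem pvFallback_none (locs : List (List (String × String)))
    (h : ∀ r, pvFo r locs = none) : pvFallback locs = none := by
  rw [pvFallback_eq_fo4 locs (fun r' _ => h r')]; exact h 4

theorem pvInnerScan_fo0 (locs : List (List (String × String))) :
    pvInnerScan "FTP Protocol" locs = pvFo 0 locs := pvInnerScan_eq_fo 0 (by omega) locs
theorem pvInnerScan_fo1 (locs : List (List (String × String))) :
    pvInnerScan "HTTP Protocol" locs = pvFo 1 locs := pvInnerScan_eq_fo 1 (by omega) locs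
theorem pvInnerScan_fo2 (locs : List (List (String × String))) :
    pvInnerScan "HTTPS Protocol" locs = pvFo 2 locs := pvInnerScan_eq_fo 2 (by omega) locs
theorem pvInnerScan_fo3 (locs : List (List (String × String))) :
    pvInnerScan "S3 Protocol" locs = pvFo 3 locs := pvInnerScan_eq_fo 3 (by omega) locs

-- ===== VERDICT (by name: the statement is the Claim_ definition above) =====
theorem extract_ftp_url_spec : Claim_equal_extract_ftp_url := by
  intro locs _
  unfold Spec_extract_ftp_url extract_ftp_url extract_ftp_url_alt
  have hchar := pvBLoop_char locs
  simp only [pvPriorityScan, pvPriority, pvInnerScan_fo0, pvInnerScan_fo1,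
    pvInnerScan_fo2, pvInnerScan_fo3]
  cases hb : pvBLoop locs none with
  | none =>
    rw [hb] at hchar
    rw [hchar 0, hchar 1, hchar 2, hchar 3]
    simp [pvFallback_none locs hchar]
  | some p =>
    rcases p with ⟨r, u⟩
    rw [hb] at hchar
    obtain ⟨h1, h2, h3⟩ := hchar
    interval_cases r
    · rw [h2]
    · rw [h3 0 (by omega), h2]
    · rw [h3 0 (by omega), h3 1 (by omega), h2]
    · rw [h3 0 (by omega), h3 1 (by omega), h3 2 (by omega), h2]
    · rw [h3 0 (by omega), h3 1 (by omega), h3 2 (by omega), h3 3 (by omega)]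
      simp [pvFallback_eq_fo4 locs (fun r' hr' => h3 r' hr'), h2]
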